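-- pv_equiv track=rewrite | github.com/skalday/youtube-analysis-ojozudesune | modules/collectors/transcript.py | _pick_sub_format
-- ===== SOURCE A (Python) =====
-- def _pick_sub_format(formats: list) -> tuple[str | None, str | None]:
--     for preferred_ext in ("json3", "vtt"):
--         for fmt in formats:
--             if fmt.get("ext") == preferred_ext:
--                 return fmt["url"], preferred_ext
--     if formats:
--         fmt = formats[0]
--         return fmt.get("url"), fmt.get("ext")
--     return None, None
-- ===== SOURCE B (Python) =====
-- def _pick_sub_format(formats: list) -> tuple[str | None, str | None]:
--     # Single pass: argmin by preference rank (json3=0, vtt=1, other=2),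
--     # strict '<' keeps the first occurrence; break early on a top-ranked hit.
--     rank = {"json3": 0, "vtt": 1}
--     best, best_rank = None, 2
--     for fmt in formats:
--         r = rank.get(fmt.get("ext"), 2)
--         if r < best_rank:
--             best, best_rank = fmt, r
--             if r == 0:
--                 break
--     if best is not None:
--         return best["url"], best.get("ext")
--     if formats:
--         return formats[0].get("url"), formats[0].get("ext")
--     return None, None
-- ===== Notes on version B (the rewrite author's own statement) =====
-- stated objective: alternative
-- what changed: Replaces A's preference-by-preference rescans of formats with a single-pass argmin selection over a numeric preference rank (json3=0, vtt=1, other=2) with first-occurrence tie-breaking and an early break on rank 0.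
import Mathlib
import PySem

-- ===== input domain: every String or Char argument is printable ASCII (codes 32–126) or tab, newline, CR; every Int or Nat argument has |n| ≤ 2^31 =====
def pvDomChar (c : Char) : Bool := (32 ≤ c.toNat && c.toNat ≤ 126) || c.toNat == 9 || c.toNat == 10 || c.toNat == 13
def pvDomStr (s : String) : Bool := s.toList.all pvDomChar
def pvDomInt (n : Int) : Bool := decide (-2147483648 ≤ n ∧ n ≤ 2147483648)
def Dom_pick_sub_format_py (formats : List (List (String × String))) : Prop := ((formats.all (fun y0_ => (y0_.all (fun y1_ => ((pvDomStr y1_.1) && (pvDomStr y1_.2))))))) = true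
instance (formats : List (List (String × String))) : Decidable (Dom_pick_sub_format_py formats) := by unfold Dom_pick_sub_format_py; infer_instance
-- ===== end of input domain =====

-- B replaces A's preference-by-preference rescans with a single-pass argmin selection over a
-- numeric preference rank (json3=0, vtt=1, other=2), first occurrence winning ties (alternative).

-- fmt.get(k) on a Python dict ported as an assoc list: first-match lookup
def pvGetKey (f : List (String × String)) (k : String) : Option String :=
  (PySem.Dict.mk f).get? k

-- ===== PORT A =====
-- inner 'for fmt in formats: if fmt.get("ext") == preferred_ext: return fmt["url"], preferred_ext'
-- fmt["url"] raises KeyError when absent: Pre_ excludes that, the port uses get? there.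
def pvA_scan (pref : String) : List (List (String × String)) → Option (Option String × Option String)
  | [] => none
  | f :: rest =>
      if pvGetKey f "ext" == some pref then some (pvGetKey f "url", some pref)
      else pvA_scan pref rest

-- outer 'for preferred_ext in ("json3", "vtt")' with the trailing fallback
def pvA_outer (formats : List (List (String × String))) : List String → Option String × Option String
  | [] =>
      match formats with
      | [] => (none, none)
      | f :: _ => (pvGetKey f "url", pvGetKey f "ext")
  | p :: ps =>
      match pvA_scan p formats with
      | some r => r
      | none => pvA_outer formats ps

def pick_sub_format_py (formats : List (List (String × String))) : Option String × Option String :=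
  pvA_outer formats ["json3", "vtt"]

-- ===== PORT B =====
-- 'rank = {"json3": 0, "vtt": 1}'
def pvRankDict : PySem.Dict (Option String) Int :=
  PySem.Dict.mk [(some "json3", 0), (some "vtt", 1)]

-- 'r = rank.get(fmt.get("ext"), 2)'
def pvRank (f : List (String × String)) : Int :=
  pvRankDict.getD (pvGetKey f "ext") 2

-- the loop: 'for fmt in formats: … if r < best_rank: best, best_rank = fmt, r; if r == 0: break'
def pvB_loop : List (List (String × String)) → Option (List (String × String)) → Int →
    Option (List (String × String)) × Int
  | [], best, bestRank => (best, bestRank)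
  | f :: rest, best, bestRank =>
      let r := pvRank f
      if r < bestRank then
        if r = 0 then (some f, r) else pvB_loop rest (some f) r
      else pvB_loop rest best bestRank

def pick_sub_format_py_alt (formats : List (List (String × String))) : Option String × Option String :=
  match pvB_loop formats none 2 with
  | (some f, _) => (pvGetKey f "url", pvGetKey f "ext")
  | (none, _) =>
      match formats with
      | [] => (none, none)
      | f :: _ => (pvGetKey f "url", pvGetKey f "ext")

-- ===== PRECONDITION & SPEC =====
-- Pre_ excludes exactly the inputs where the Python raises KeyError on the matched fmt["url"]:
-- the first format whose "ext" is "json3" (else, failing that, "vtt") lacks a "url" key.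
def Pre_pick_sub_format_py (formats : List (List (String × String))) : Prop :=
  (match formats.find? (fun f => pvGetKey f "ext" == some "json3") with
   | some f => (pvGetKey f "url").isSome
   | none =>
      match formats.find? (fun f => pvGetKey f "ext" == some "vtt") with
      | some f => (pvGetKey f "url").isSome
      | none => true) = true
instance (formats : List (List (String × String))) : Decidable (Pre_pick_sub_format_py formats) := by
  unfold Pre_pick_sub_format_py; infer_instance

def pvWitness_pick_sub_format_py : (List (List (String × String))) :=
  [[("ext", "srv1"), ("url", "u0")], [("ext", "vtt"), ("url", "u1")]]

def Spec_pick_sub_format_py (formats : List (List (String × String))) (out : Option String × Option String) : Prop := out = pick_sub_format_py_alt formats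
instance (formats : List (List (String × String))) (out : Option String × Option String) : Decidable (Spec_pick_sub_format_py formats out) := by unfold Spec_pick_sub_format_py; infer_instance

-- ===== CLAIM (what is proved, stated in full; the proofs are below) =====
def Claim_equal_pick_sub_format_py : Prop := ∀ (formats : List (List (String × String))), Dom_pick_sub_format_py formats → Pre_pick_sub_format_py formats → Spec_pick_sub_format_py formats (pick_sub_format_py formats)

-- ===== LEMMAS AND PROOFS =====

-- rank characterisation
theorem pvRank_eq (f : List (String × String)) :
    pvRank f = if pvGetKey f "ext" = some "json3" then 0
               else if pvGetKey f "ext" = some "vtt" then 1 else 2 := by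
  unfold pvRank pvRankDict
  by_cases hj : pvGetKey f "ext" = some "json3"
  · simp [PySem.Dict.getD, PySem.Dict.get?_mk_cons, hj]
  · by_cases hv : pvGetKey f "ext" = some "vtt"
    · simp [PySem.Dict.getD, PySem.Dict.get?_mk_cons, hv]
    · simp [PySem.Dict.getD, PySem.Dict.get?, hj, hv, Ne.symm hj, Ne.symm hv]

-- from state (some g, 1) the loop only looks for a json3 format
theorem pvB_loop_one (g : List (String × String)) :
    ∀ fs : List (List (String × String)),
    pvB_loop fs (some g) 1 =
      match fs.find? (fun f => pvGetKey f "ext" == some "json3") with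
      | some f => (some f, 0)
      | none => (some g, 1) := by
  intro fs
  induction fs generalizing g with
  | nil => simp [pvB_loop]
  | cons f rest ih =>
      simp only [pvB_loop, List.find?_cons, pvRank_eq]
      by_cases hj : pvGetKey f "ext" = some "json3"
      · simp [hj]
      · have hjb : (pvGetKey f "ext" == some "json3") = false := by simp [hj]
        by_cases hv : pvGetKey f "ext" = some "vtt" <;> simp [hjb, hj, hv, ih]

-- from the initial state the loop finds the first json3, else the first vtt
theorem pvB_loop_init :
    ∀ fs : List (List (String × String)),
    pvB_loop fs none 2 =
      match fs.find? (fun f => pvGetKey f "ext" == some "json3") with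
      | some f => (some f, 0)
      | none =>
        match fs.find? (fun f => pvGetKey f "ext" == some "vtt") with
        | some f => (some f, 1)
        | none => (none, 2) := by
  intro fs
  induction fs with
  | nil => simp [pvB_loop]
  | cons f rest ih =>
      simp only [pvB_loop, List.find?_cons, pvRank_eq]
      by_cases hj : pvGetKey f "ext" = some "json3"
      · simp [hj]
      · have hjb : (pvGetKey f "ext" == some "json3") = false := by simp [hj]
        by_cases hv : pvGetKey f "ext" = some "vtt"
        · simp [hv, pvB_loop_one]
        · have hvb : (pvGetKey f "ext" == some "vtt") = false := by simp [hv]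
          simp [hjb, hvb, hj, hv, ih]

-- A's inner scan is the first-match find?, decorated with url/ext.
theorem pvA_scan_eq (p : String) (fs : List (List (String × String))) :
    pvA_scan p fs =
      (fs.find? (fun f => pvGetKey f "ext" == some p)).map (fun f => (pvGetKey f "url", some p)) := by
  induction fs with
  | nil => simp [pvA_scan]
  | cons f rest ih =>
      by_cases h : pvGetKey f "ext" == some p
      · simp [pvA_scan, h]
      · simp [pvA_scan, h, ih]

theorem pick_sub_format_eq (formats : List (List (String × String))) :
    pick_sub_format_py formats = pick_sub_format_py_alt formats := by
  cases hj : formats.find? (fun f => pvGetKey f "ext" == some "json3") with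
  | some f =>
      have hf := List.find?_some hj
      have hext : pvGetKey f "ext" = some "json3" := by simpa using hf
      simp [pick_sub_format_py, pick_sub_format_py_alt, pvA_outer,
        pvA_scan_eq, pvB_loop_init, hj, hext]
  | none =>
      cases hv : formats.find? (fun f => pvGetKey f "ext" == some "vtt") with
      | some f =>
          have hf := List.find?_some hv
          have hext : pvGetKey f "ext" = some "vtt" := by simpa using hf
          simp [pick_sub_format_py, pick_sub_format_py_alt, pvA_outer,
            pvA_scan_eq, pvB_loop_init, hj, hv, hext]
      | none =>
          cases formats <;>
            simp [pick_sub_format_py, pick_sub_format_py_alt, pvA_outer,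
              pvA_scan_eq, pvB_loop_init, hj, hv]

-- ===== VERDICT (by name: the statement is the Claim_ definition above) =====
theorem pick_sub_format_py_spec : Claim_equal_pick_sub_format_py := by
  intro formats _ _
  unfold Spec_pick_sub_format_py
  exact pick_sub_format_eq formats
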